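-- pv_equiv track=rewrite | github.com/adibsxion19/CS1114 | HW/hw6_q8.py | toPirate
-- ===== SOURCE A (Python) =====
-- def toPirate(en_sentence):
--     word = ''
--     prev_char = ' '
--     pirate_sent = ''
--     index = 0
--     for char in en_sentence:
--         if char.isalnum():
--             word += char
--             continue
--         new_word = ""
--         if word.lower() == 'hello':
--             new_word = 'avast'
--         elif word.lower() == 'excuse':
--             new_word = 'arrr'
--         elif word.lower() == 'sir' or word == 'boy' or word == 'man':
--             new_word = 'matey'
--         elif word.lower() == 'madam':
--             new_word = 'proud beauty'
--         elif word.lower() == 'officer':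
--             new_word = 'foul blaggard'
--         elif word.lower() == 'the':
--             new_word = "th'"
--         elif word.lower() == 'my':
--             new_word =  'me'
--         elif word.lower() == 'your':
--             new_word = 'yer'
--         elif word.lower() == 'is':
--             new_word ='be'
--         elif word.lower() == 'are':
--             new_word =  'be'
--         elif word.lower() == 'restroom':
--             new_word = 'head'
--         elif word.lower() == 'restaurant':
--             new_word =  'galley'
--         elif word.lower() == 'hotel':
--             new_word = 'fleabag inn'
--         else:
--             new_word = word
--         word
--         pirate_sent += new_word + char
--         word = ''
--     pirate_sent = pirate_sent[0].upper() + pirate_sent[1:]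
--     return pirate_sent
-- ===== SOURCE B (Python) =====
-- PIRATE = {
--     'hello': 'avast', 'excuse': 'arrr', 'sir': 'matey',
--     'madam': 'proud beauty', 'officer': 'foul blaggard', 'the': "th'",
--     'my': 'me', 'your': 'yer', 'is': 'be', 'are': 'be',
--     'restroom': 'head', 'restaurant': 'galley', 'hotel': 'fleabag inn',
-- }
--
--
-- def _translate(w):
--     # 'boy' and 'man' are matched case-sensitively; everything else by lowercase.
--     if w in ('boy', 'man'):
--         return 'matey'
--     return PIRATE.get(w.lower(), w)
--
--
-- def toPirate(en_sentence):
--     # Stage 1: positions of all delimiters (non-alphanumeric characters).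
--     cuts = [i for i, c in enumerate(en_sentence) if not c.isalnum()]
--     # Stage 2: each word is the slice between the previous delimiter and the
--     # next one; a trailing run with no delimiter after it is naturally dropped.
--     starts = [0] + [i + 1 for i in cuts]
--     out = ''.join(_translate(en_sentence[a:b]) + en_sentence[b]
--                   for a, b in zip(starts, cuts))
--     return out[0].upper() + out[1:]
-- ===== Notes on version B (the rewrite author's own statement) =====
-- stated objective: alternative
-- what changed: A buffers characters into a word inside one char loop and substitutes via a 14-branch elif chain at each delimiter; B never buffers: it first computes the list of delimiter positions with an enumerate comprehension, then reconstructs each word by index slicing between consecutive delimiters (zip of starts and cuts) and joins the translated slices.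
import Mathlib
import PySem

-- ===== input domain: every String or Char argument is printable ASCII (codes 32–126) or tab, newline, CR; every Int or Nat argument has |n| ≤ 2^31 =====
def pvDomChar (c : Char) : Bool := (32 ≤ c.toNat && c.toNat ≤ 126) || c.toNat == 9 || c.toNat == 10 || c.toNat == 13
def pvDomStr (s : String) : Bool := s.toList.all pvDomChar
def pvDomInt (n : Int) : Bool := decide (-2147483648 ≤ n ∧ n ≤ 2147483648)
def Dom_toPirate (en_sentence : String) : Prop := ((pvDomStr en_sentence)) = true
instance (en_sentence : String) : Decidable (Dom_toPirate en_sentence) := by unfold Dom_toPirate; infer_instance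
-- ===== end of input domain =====

-- B replaces A's single buffering char loop by staged passes: first list the delimiter
-- POSITIONS, then cut the words out by index slicing and join (alternative decomposition,
-- same cost); return values agree on all of Pre_.

-- ===== PORT A =====
-- A's inline elif chain (the loop body's translation step, branches in source order).
def pvTransA (w : List Char) : List Char :=
  if PySem.Chars.lower w = "hello".toList then "avast".toList
  else if PySem.Chars.lower w = "excuse".toList then "arrr".toList
  else if PySem.Chars.lower w = "sir".toList ∨ w = "boy".toList ∨ w = "man".toList then "matey".toList
  else if PySem.Chars.lower w = "madam".toList then "proud beauty".toList
  else if PySem.Chars.lower w = "officer".toList then "foul blaggard".toList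
  else if PySem.Chars.lower w = "the".toList then "th'".toList
  else if PySem.Chars.lower w = "my".toList then "me".toList
  else if PySem.Chars.lower w = "your".toList then "yer".toList
  else if PySem.Chars.lower w = "is".toList then "be".toList
  else if PySem.Chars.lower w = "are".toList then "be".toList
  else if PySem.Chars.lower w = "restroom".toList then "head".toList
  else if PySem.Chars.lower w = "restaurant".toList then "galley".toList
  else if PySem.Chars.lower w = "hotel".toList then "fleabag inn".toList
  else w

-- A's loop state: (word, pirate_sent).  (prev_char and index are dead in A and dropped.)
def pvStepA (st : List Char × List Char) (c : Char) : List Char × List Char :=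
  if PySem.Chars.isalnum c then (st.1 ++ [c], st.2)
  else ([], st.2 ++ pvTransA st.1 ++ [c])

def toPirate (en_sentence : String) : String :=
  match (en_sentence.toList.foldl pvStepA ([], [])).2 with
  | [] => ""  -- Python raises IndexError on pirate_sent[0] here; excluded by Pre_toPirate
  | c :: rest => String.ofList (PySem.Chars.upperChar c :: rest)

-- ===== PORT B =====
-- the PIRATE dict of Source B
def pvPirateDict : PySem.Dict (List Char) (List Char) :=
  PySem.Dict.ofList
    [("hello".toList, "avast".toList), ("excuse".toList, "arrr".toList),
     ("sir".toList, "matey".toList), ("madam".toList, "proud beauty".toList),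
     ("officer".toList, "foul blaggard".toList), ("the".toList, "th'".toList),
     ("my".toList, "me".toList), ("your".toList, "yer".toList),
     ("is".toList, "be".toList), ("are".toList, "be".toList),
     ("restroom".toList, "head".toList), ("restaurant".toList, "galley".toList),
     ("hotel".toList, "fleabag inn".toList)]

-- _translate of Source B
def pvTransB (w : List Char) : List Char :=
  if w = "boy".toList ∨ w = "man".toList then "matey".toList
  else PySem.Dict.getD pvPirateDict (PySem.Chars.lower w) w

def toPirate_alt (en_sentence : String) : String :=
  let s := en_sentence.toList
  -- cuts = [i for i, c in enumerate(en_sentence) if not c.isalnum()]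
  let cuts := ((PySem.List.enumerate s).filter (fun q => !PySem.Chars.isalnum q.2)).map (fun q => q.1)
  -- starts = [0] + [i + 1 for i in cuts]
  let starts := 0 :: cuts.map (fun i => i + 1)
  -- ''.join(_translate(s[a:b]) + s[b] for a, b in zip(starts, cuts)); s[b] is always in range
  match (List.zip starts cuts).flatMap
      (fun q => pvTransB (PySem.List.slice s (some q.1) (some q.2)) ++ [PySem.List.pyGetD s q.2 ' ']) with
  | [] => ""  -- Python raises IndexError on out[0] here; excluded by Pre_toPirate
  | c :: rest => String.ofList (PySem.Chars.upperChar c :: rest)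

-- ===== PRECONDITION & SPEC =====
-- Pre_ excludes exactly the sentences with no non-alphanumeric character (including ""),
-- on which Python A raises IndexError (pirate_sent stays empty).
def Pre_toPirate (en_sentence : String) : Prop :=
  en_sentence.toList.any (fun c => !PySem.Chars.isalnum c) = true
instance (en_sentence : String) : Decidable (Pre_toPirate en_sentence) := by
  unfold Pre_toPirate; infer_instance

def pvWitness_toPirate : String := "hello sir!"

def Spec_toPirate (en_sentence : String) (out : String) : Prop := out = toPirate_alt en_sentence
instance (en_sentence : String) (out : String) : Decidable (Spec_toPirate en_sentence out) := by
  unfold Spec_toPirate; infer_instance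

-- ===== CLAIM (what is proved, stated in full; the proofs are below) =====
def Claim_equal_toPirate : Prop := ∀ (en_sentence : String), Dom_toPirate en_sentence → Pre_toPirate en_sentence → Spec_toPirate en_sentence (toPirate en_sentence)

-- ===== LEMMAS AND PROOFS =====

theorem pvPirateDict_items : pvPirateDict.items =
    [("hello".toList, "avast".toList), ("excuse".toList, "arrr".toList),
     ("sir".toList, "matey".toList), ("madam".toList, "proud beauty".toList),
     ("officer".toList, "foul blaggard".toList), ("the".toList, "th'".toList),
     ("my".toList, "me".toList), ("your".toList, "yer".toList),
     ("is".toList, "be".toList), ("are".toList, "be".toList),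
     ("restroom".toList, "head".toList), ("restaurant".toList, "galley".toList),
     ("hotel".toList, "fleabag inn".toList)] := by rfl

-- B's dict lookup written as the key-order if-chain.
theorem pvGetD_eq (l w : List Char) :
    PySem.Dict.getD pvPirateDict l w =
      (if l = "hello".toList then "avast".toList
    else if l = "excuse".toList then "arrr".toList
    else if l = "sir".toList then "matey".toList
    else if l = "madam".toList then "proud beauty".toList
    else if l = "officer".toList then "foul blaggard".toList
    else if l = "the".toList then "th'".toList
    else if l = "my".toList then "me".toList
    else if l = "your".toList then "yer".toList
    else if l = "is".toList then "be".toList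
    else if l = "are".toList then "be".toList
    else if l = "restroom".toList then "head".toList
    else if l = "restaurant".toList then "galley".toList
    else if l = "hotel".toList then "fleabag inn".toList
    else w) := by
  simp only [PySem.Dict.getD, PySem.Dict.get?, pvPirateDict_items]
  by_cases h1 : l = "hello".toList
  · subst h1; rfl
  rw [if_neg h1, List.find?_cons_of_neg (by simp only [beq_iff_eq]; exact fun h => h1 h.symm)]
  by_cases h2 : l = "excuse".toList
  · subst h2; rfl
  rw [if_neg h2, List.find?_cons_of_neg (by simp only [beq_iff_eq]; exact fun h => h2 h.symm)]
  by_cases h3 : l = "sir".toList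
  · subst h3; rfl
  rw [if_neg h3, List.find?_cons_of_neg (by simp only [beq_iff_eq]; exact fun h => h3 h.symm)]
  by_cases h4 : l = "madam".toList
  · subst h4; rfl
  rw [if_neg h4, List.find?_cons_of_neg (by simp only [beq_iff_eq]; exact fun h => h4 h.symm)]
  by_cases h5 : l = "officer".toList
  · subst h5; rfl
  rw [if_neg h5, List.find?_cons_of_neg (by simp only [beq_iff_eq]; exact fun h => h5 h.symm)]
  by_cases h6 : l = "the".toList
  · subst h6; rfl
  rw [if_neg h6, List.find?_cons_of_neg (by simp only [beq_iff_eq]; exact fun h => h6 h.symm)]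
  by_cases h7 : l = "my".toList
  · subst h7; rfl
  rw [if_neg h7, List.find?_cons_of_neg (by simp only [beq_iff_eq]; exact fun h => h7 h.symm)]
  by_cases h8 : l = "your".toList
  · subst h8; rfl
  rw [if_neg h8, List.find?_cons_of_neg (by simp only [beq_iff_eq]; exact fun h => h8 h.symm)]
  by_cases h9 : l = "is".toList
  · subst h9; rfl
  rw [if_neg h9, List.find?_cons_of_neg (by simp only [beq_iff_eq]; exact fun h => h9 h.symm)]
  by_cases h10 : l = "are".toList
  · subst h10; rfl
  rw [if_neg h10, List.find?_cons_of_neg (by simp only [beq_iff_eq]; exact fun h => h10 h.symm)]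
  by_cases h11 : l = "restroom".toList
  · subst h11; rfl
  rw [if_neg h11, List.find?_cons_of_neg (by simp only [beq_iff_eq]; exact fun h => h11 h.symm)]
  by_cases h12 : l = "restaurant".toList
  · subst h12; rfl
  rw [if_neg h12, List.find?_cons_of_neg (by simp only [beq_iff_eq]; exact fun h => h12 h.symm)]
  by_cases h13 : l = "hotel".toList
  · subst h13; rfl
  rw [if_neg h13, List.find?_cons_of_neg (by simp only [beq_iff_eq]; exact fun h => h13 h.symm)]
  rfl

-- A's elif chain and B's dict-based translator agree on every word.
theorem pvTrans_eq (w : List Char) : pvTransA w = pvTransB w := by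
  by_cases hb : w = "boy".toList
  · subst hb; rfl
  by_cases hm : w = "man".toList
  · subst hm; rfl
  rw [pvTransA, pvTransB, pvGetD_eq,
    if_neg (show ¬(w = "boy".toList ∨ w = "man".toList) from fun h => h.elim hb hm)]
  have hb' : ¬w = ['b', 'o', 'y'] := hb
  have hm' : ¬w = ['m', 'a', 'n'] := hm
  simp [hb', hm']

-- reference tokenizer for the proof: the (word, delimiter) pairs A's loop emits
def pvStepB (st : List Char × List (List Char × Char)) (c : Char) :
    List Char × List (List Char × Char) :=
  if PySem.Chars.isalnum c then (st.1 ++ [c], st.2)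
  else ([], st.2 ++ [(st.1, c)])

-- delimiter positions of s when the scan starts at absolute position k
def pvCutsE : List Char → Nat → List Int
  | [], _ => []
  | c :: s, k => if PySem.Chars.isalnum c then pvCutsE s (k + 1)
                 else (k : Int) :: pvCutsE s (k + 1)

-- B's rendering of a cut list, carried out cut by cut from the previous start
def pvRenderFrom (s : List Char) : Int → List Int → List Char
  | _, [] => []
  | prev, j :: rest =>
      pvTransB (PySem.List.slice s (some prev) (some j)) ++ [PySem.List.pyGetD s j ' ']
        ++ pvRenderFrom s (j + 1) rest

-- the enumerate-filter-map comprehension of B computes pvCutsE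
theorem pvEnumCuts (s : List Char) (k : Nat) :
    ((PySem.List.enumerate s (k : Int)).filter (fun q => !PySem.Chars.isalnum q.2)).map
        (fun q => q.1) = pvCutsE s k := by
  induction s generalizing k with
  | nil => rfl
  | cons c s ih =>
    rw [PySem.List.enumerate_cons]
    have hcast : ((k : Int) + 1) = ((k + 1 : Nat) : Int) := by push_cast; ring
    by_cases h : PySem.Chars.isalnum c
    · rw [List.filter_cons_of_neg (by simp [h]), hcast, ih (k + 1), pvCutsE, if_pos h]
    · rw [List.filter_cons_of_pos (by simp [h]), List.map_cons, hcast, ih (k + 1),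
        pvCutsE, if_neg h]

-- B's zip-and-join over (starts, cuts) is the cut-by-cut rendering
theorem pvZipRender (s : List Char) (prev : Int) (cuts : List Int) :
    (List.zip (prev :: cuts.map (fun i => i + 1)) cuts).flatMap
        (fun q => pvTransB (PySem.List.slice s (some q.1) (some q.2))
          ++ [PySem.List.pyGetD s q.2 ' ']) = pvRenderFrom s prev cuts := by
  induction cuts generalizing prev with
  | nil => rfl
  | cons j rest ih => simp [List.zip, pvRenderFrom, ← ih (j + 1)]

-- tokenizer accumulator splits off
theorem pvFoldB_acc (cs : List Char) (w : List Char) (ps : List (List Char × Char)) :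
    (cs.foldl pvStepB (w, ps)).2 = ps ++ (cs.foldl pvStepB (w, [])).2 := by
  induction cs generalizing w ps with
  | nil => simp
  | cons c cs ih =>
    simp only [List.foldl_cons]
    by_cases h : PySem.Chars.isalnum c
    · rw [show pvStepB (w, ps) c = (w ++ [c], ps) from by simp [pvStepB, h],
        show pvStepB (w, []) c = (w ++ [c], []) from by simp [pvStepB, h]]
      exact ih _ _
    · rw [show pvStepB (w, ps) c = ([], ps ++ [(w, c)]) from by simp [pvStepB, h],
        show pvStepB (w, []) c = ([], [(w, c)]) from by simp [pvStepB, h]]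
      rw [ih [] (ps ++ [(w, c)]), ih [] [(w, c)]]
      simp

-- A's loop equals the rendering of the token stream
theorem pvFoldA_eq (cs : List Char) (w : List Char) (p : List Char) :
    (cs.foldl pvStepA (w, p)).2 =
      p ++ ((cs.foldl pvStepB (w, [])).2).flatMap (fun q => pvTransA q.1 ++ [q.2]) := by
  induction cs generalizing w p with
  | nil => simp
  | cons c cs ih =>
    simp only [List.foldl_cons]
    by_cases h : PySem.Chars.isalnum c
    · rw [show pvStepA (w, p) c = (w ++ [c], p) from by simp [pvStepA, h],
        show pvStepB (w, []) c = (w ++ [c], []) from by simp [pvStepB, h]]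
      exact ih _ _
    · rw [show pvStepA (w, p) c = ([], p ++ pvTransA w ++ [c]) from by simp [pvStepA, h],
        show pvStepB (w, []) c = ([], [(w, c)]) from by simp [pvStepB, h]]
      rw [ih, pvFoldB_acc cs [] [(w, c)]]
      simp

-- MAIN: B's index-slicing rendering of its cut list equals the rendering of A's tokens.
theorem pvMain (s0 : List Char) (s w : List Char) (p : Nat) (h : s0.drop p = w ++ s) :
    pvRenderFrom s0 (p : Int) (pvCutsE s (p + w.length)) =
      ((s.foldl pvStepB (w, [])).2).flatMap (fun q => pvTransA q.1 ++ [q.2]) := by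
  induction s generalizing w p with
  | nil => rfl
  | cons c s ih =>
    by_cases hc : PySem.Chars.isalnum c
    · rw [show pvCutsE (c :: s) (p + w.length) = pvCutsE s (p + w.length + 1) from by
        simp [pvCutsE, hc]]
      rw [List.foldl_cons, show pvStepB (w, []) c = (w ++ [c], []) from by simp [pvStepB, hc]]
      have h' : s0.drop p = (w ++ [c]) ++ s := by simpa using h
      have := ih (w ++ [c]) p h'
      simpa [List.length_append, Nat.add_assoc] using this
    · rw [show pvCutsE (c :: s) (p + w.length)
          = ((p + w.length : Nat) : Int) :: pvCutsE s (p + w.length + 1) from by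
        simp [pvCutsE, hc]]
      rw [List.foldl_cons, show pvStepB (w, []) c = ([], [(w, c)]) from by simp [pvStepB, hc]]
      rw [pvFoldB_acc s [] [(w, c)]]
      have hslice : PySem.List.slice s0 (some (p : Int)) (some ((p + w.length : Nat) : Int)) = w := by
        rw [PySem.List.slice_natCast]
        have : p + w.length - p = w.length := by omega
        rw [this, h, List.take_left]
      have hget : PySem.List.pyGetD s0 ((p + w.length : Nat) : Int) ' ' = c := by
        rw [PySem.List.pyGetD_natCast]
        have h1 : s0[p + w.length]? = some c := by
          rw [← List.getElem?_drop, h]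
          simp
        simp [List.getD, h1]
      have hdrop : s0.drop (p + w.length + 1) = s := by
        have : s0.drop (p + w.length + 1) = (s0.drop p).drop (w.length + 1) := by
          rw [List.drop_drop]; ring_nf
        rw [this, h, show w ++ c :: s = (w ++ [c]) ++ s from by simp]
        have : (w ++ [c]).length = w.length + 1 := by simp
        rw [← this, List.drop_left]
      have := ih [] (p + w.length + 1) (by simpa using hdrop)
      simp only [List.length_nil, Nat.add_zero] at this
      rw [pvRenderFrom, hslice, hget]
      have hcast : ((p + w.length : Nat) : Int) + 1 = ((p + w.length + 1 : Nat) : Int) := by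
        push_cast; ring
      rw [hcast, this]
      simp [pvTrans_eq]

-- ===== VERDICT (by name: the statement is the Claim_ definition above) =====
theorem toPirate_spec : Claim_equal_toPirate := by
  intro s _ _
  unfold Spec_toPirate toPirate toPirate_alt
  have hcuts : ((PySem.List.enumerate s.toList (0 : Int)).filter
      (fun q => !PySem.Chars.isalnum q.2)).map (fun q => q.1) = pvCutsE s.toList 0 := by
    have := pvEnumCuts s.toList 0
    simpa using this
  rw [pvFoldA_eq s.toList [] []]
  simp only [hcuts]
  rw [show (0 : Int) = ((0 : Nat) : Int) from rfl, pvZipRender]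
  have hm := pvMain s.toList s.toList [] 0 (by simp)
  simp only [List.length_nil, Nat.add_zero] at hm
  rw [hm, List.nil_append]
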